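-- pv_equiv track=rewrite | github.com/MinChul-Son/for-Coding-Test | 11st.py | solution
-- ===== SOURCE A (Python) =====
-- def solution(A):
--     max_even = 0
--     max_odd = 0
--
--     for i in A:
--         if i % 2 == 0:
--             max_even = max(i, max_even)
--         else:
--             max_odd = max(i, max_odd)
--
--     return max_even + max_odd
-- ===== SOURCE B (Python) =====
-- def solution(A):
--     evens = max((i for i in A if i % 2 == 0), default=0)
--     odds = max((i for i in A if i % 2 != 0), default=0)
--     return max(0, evens) + max(0, odds)
-- ===== Notes on version B (the rewrite author's own statement) =====
-- stated objective: simpler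
-- what changed: Replaces the single interleaved loop with two-variable state by two independent filtered maxima (evens and odds) floored at 0, then added.
import Mathlib
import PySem

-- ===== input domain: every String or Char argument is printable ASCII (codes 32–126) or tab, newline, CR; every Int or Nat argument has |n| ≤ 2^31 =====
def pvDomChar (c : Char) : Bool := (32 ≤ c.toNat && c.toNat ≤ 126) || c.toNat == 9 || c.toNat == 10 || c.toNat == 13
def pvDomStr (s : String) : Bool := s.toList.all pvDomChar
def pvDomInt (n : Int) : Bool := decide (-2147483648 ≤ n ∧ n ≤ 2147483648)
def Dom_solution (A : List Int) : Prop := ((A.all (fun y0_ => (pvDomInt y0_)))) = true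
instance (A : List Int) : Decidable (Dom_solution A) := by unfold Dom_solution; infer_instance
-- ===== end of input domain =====

-- B replaces A's interleaved loop over a two-variable state by two independent
-- filtered maxima (evens, odds) floored at 0, then added (objective: simpler).

-- ===== PORT A =====
-- literal port: one loop carrying (max_even, max_odd)
def solution (A : List Int) : Int :=
  let p := A.foldl (fun (st : Int × Int) i =>
    if PySem.Int.mod i 2 = 0 then (max i st.1, st.2) else (st.1, max i st.2))
    (0, 0)
  p.1 + p.2

-- ===== PORT B =====
-- max(gen, default=0) ported via PySem.List.max? with 0 for none
def solution_alt (A : List Int) : Int :=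
  let evens := match PySem.List.max? (A.filter (fun i => PySem.Int.mod i 2 = 0)) (fun x => x) with
    | some m => m
    | none => 0
  let odds := match PySem.List.max? (A.filter (fun i => PySem.Int.mod i 2 ≠ 0)) (fun x => x) with
    | some m => m
    | none => 0
  max 0 evens + max 0 odds

-- ===== PRECONDITION & SPEC =====
def Spec_solution (A : List Int) (out : Int) : Prop := out = solution_alt A
instance (A : List Int) (out : Int) : Decidable (Spec_solution A out) := by unfold Spec_solution; infer_instance

-- ===== CLAIM (what is proved, stated in full; the proofs are below) =====
def Claim_equal_solution : Prop := ∀ (A : List Int), Dom_solution A → Spec_solution A (solution A)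

-- ===== LEMMAS AND PROOFS =====

-- A's loop splits into the two folds over the filtered sublists (abstract predicate)
theorem loop_split (p : Int → Bool) (l : List Int) (e o : Int) :
    l.foldl (fun (st : Int × Int) i =>
      if p i then (max i st.1, st.2) else (st.1, max i st.2)) (e, o)
    = ((l.filter p).foldl max e, (l.filter (fun i => !p i)).foldl max o) := by
  induction l generalizing e o with
  | nil => simp
  | cons i t ih =>
    simp only [List.foldl, List.filter_cons]
    cases hp : p i <;> simp [ih, max_comm]

-- max with default, floored at 0, equals the fold of max starting from 0
theorem maxD_floor (l : List Int) :
    max 0 ((match PySem.List.max? l (fun x => x) with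
            | some m => m | none => (0 : Int))) = l.foldl max 0 := by
  cases l with
  | nil => simp [PySem.List.max?]
  | cons x t =>
    rw [PySem.List.max?_id_cons]
    simp only [List.foldl]
    induction t generalizing x with
    | nil => simp
    | cons y s ih => simp [List.foldl, ih, max_assoc]

-- ===== VERDICT (by name: the statement is the Claim_ definition above) =====
theorem solution_spec : Claim_equal_solution := by
  intro A _
  unfold Spec_solution solution solution_alt
  have hs := loop_split (fun i => decide (PySem.Int.mod i 2 = 0)) A 0 0
  simp only [decide_eq_true_eq] at hs
  simp only [hs]
  rw [← maxD_floor, ← maxD_floor]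
  simp only [decide_not]
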